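-- pv_equiv track=rewrite | github.com/rayment/bookfind | bookfind.py | money_strip
-- ===== SOURCE A (Python) =====
-- def money_strip(price_str):
-- 	stripped = ''
-- 	dot = False
-- 	for c in price_str:
-- 		if c.isdigit() or (not dot and c == '.'):
-- 			stripped += c
-- 			if c == '.':
-- 				dot = True
-- 	return stripped
-- ===== SOURCE B (Python) =====
-- def money_strip(price_str):
-- 	head, sep, tail = price_str.partition('.')
-- 	return ''.join(c for c in head if c.isdigit()) + sep + ''.join(c for c in tail if c.isdigit())
-- ===== Notes on version B (the rewrite author's own statement) =====
-- stated objective: simpler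
-- what changed: Replaces the character loop with its dot-seen boolean flag by a single partition at the first dot followed by two digit filters, joined with the separator.
import Mathlib
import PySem

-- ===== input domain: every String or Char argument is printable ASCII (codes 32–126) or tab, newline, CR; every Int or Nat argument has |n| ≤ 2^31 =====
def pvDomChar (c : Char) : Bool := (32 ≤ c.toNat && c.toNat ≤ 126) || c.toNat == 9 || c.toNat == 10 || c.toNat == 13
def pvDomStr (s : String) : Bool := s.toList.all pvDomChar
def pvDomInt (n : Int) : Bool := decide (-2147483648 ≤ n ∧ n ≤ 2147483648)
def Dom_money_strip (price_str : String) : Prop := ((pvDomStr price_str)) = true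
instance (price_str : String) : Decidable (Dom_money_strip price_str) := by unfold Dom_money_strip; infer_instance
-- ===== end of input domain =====

-- B replaces A's character loop with a dot-seen flag by a partition at the first dot plus two digit filters; objective: simpler.

-- ===== PORT A =====
-- the loop: state is (stripped so far, dot seen)
def moneyLoop (cs : List Char) (st : List Char × Bool) : List Char × Bool :=
  cs.foldl
    (fun st c =>
      if PySem.Chars.isdigit c || (!st.2 && c == '.') then
        (st.1 ++ [c], if c == '.' then true else st.2)
      else st)
    st

def money_strip (price_str : String) : String :=
  String.ofList (moneyLoop price_str.toList ([], false)).1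

-- ===== PORT B =====
-- head, sep, tail = price_str.partition('.')  (takeWhile/dropWhile at the first '.')
def money_strip_alt (price_str : String) : String :=
  let cs := price_str.toList
  let head := cs.takeWhile (· != '.')
  match cs.dropWhile (· != '.') with
  | [] => String.ofList (head.filter PySem.Chars.isdigit)
  | _ :: tail => String.ofList (head.filter PySem.Chars.isdigit ++ '.' :: tail.filter PySem.Chars.isdigit)

-- ===== PRECONDITION & SPEC =====
def Spec_money_strip (price_str : String) (out : String) : Prop := out = money_strip_alt price_str
instance (price_str : String) (out : String) : Decidable (Spec_money_strip price_str out) := by unfold Spec_money_strip; infer_instance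

-- ===== CLAIM (what is proved, stated in full; the proofs are below) =====
def Claim_equal_money_strip : Prop := ∀ (price_str : String), Dom_money_strip price_str → Spec_money_strip price_str (money_strip price_str)

-- ===== LEMMAS AND PROOFS =====

-- once the dot has been seen the loop only keeps digits
theorem moneyLoop_true (cs : List Char) (acc : List Char) :
    moneyLoop cs (acc, true) = (acc ++ cs.filter PySem.Chars.isdigit, true) := by
  induction cs generalizing acc with
  | nil => simp [moneyLoop]
  | cons c cs ih =>
    by_cases hd : PySem.Chars.isdigit c = true
    · have hne : (c == '.') = false := by
        cases hc : (c == '.')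
        · rfl
        · exfalso
          have : c = '.' := by simpa using hc
          subst this
          simp [PySem.Chars.isdigit] at hd
      simp [moneyLoop, List.foldl_cons, hd, hne] at *
      simpa [hd] using ih (acc ++ [c])
    · simp only [Bool.not_eq_true] at hd
      simp [moneyLoop, List.foldl_cons, hd] at *
      simpa [hd] using ih acc

-- before the dot the loop computes B's partition form
theorem moneyLoop_false (cs : List Char) (acc : List Char) :
    (moneyLoop cs (acc, false)).1 =
      acc ++ ((cs.takeWhile (· != '.')).filter PySem.Chars.isdigit ++
        match cs.dropWhile (· != '.') with
        | [] => []
        | _ :: tail => '.' :: tail.filter PySem.Chars.isdigit) := by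
  induction cs generalizing acc with
  | nil => simp [moneyLoop]
  | cons c cs ih =>
    by_cases hdot : c = '.'
    · subst hdot
      have hd : PySem.Chars.isdigit '.' = false := by decide
      simp [moneyLoop, List.foldl_cons, hd] at *
      have := moneyLoop_true cs (acc ++ ['.'])
      simp [moneyLoop] at this
      simp [this]
    · have hne : (c != '.') = true := by simp [hdot]
      by_cases hd : PySem.Chars.isdigit c = true
      · have hne2 : (c == '.') = false := by simp [hdot]
        simp only [moneyLoop, List.foldl_cons, hd, hne2, Bool.true_or, if_true, if_false,
          Bool.false_eq_true] at ih ⊢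
        rw [ih (acc ++ [c])]
        simp [hne, hd]
      · simp only [Bool.not_eq_true] at hd
        have hne2 : (c == '.') = false := by simp [hdot]
        simp only [moneyLoop, List.foldl_cons, hd, hne2, Bool.not_false, Bool.false_or,
          Bool.and_false, if_false, Bool.false_eq_true] at ih ⊢
        rw [ih acc]
        simp [hne, hd]

-- ===== VERDICT (by name: the statement is the Claim_ definition above) =====
theorem money_strip_spec : Claim_equal_money_strip := by
  intro s _
  show money_strip s = money_strip_alt s
  unfold money_strip money_strip_alt
  rw [moneyLoop_false]
  cases h : s.toList.dropWhile (· != '.') <;> simp [h]
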